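-- pv_equiv track=rewrite | github.com/FrostyDesigner/Python_Scripts | InteractiveDictionary/lookup_values.py | keys_containing_value
-- ===== SOURCE A (Python) =====
-- from typing import Any
-- from typing import Dict
-- from typing import Iterable
--
-- def keys_containing_value(d: Dict, needle: Any):
--     def recursively_in(x: Any, n: Any):
--         if isinstance(x, str) and isinstance(n, str):
--             return n in x
--         if type(x) is type(n):
--             return x == n
--         if isinstance(x, Iterable) and not isinstance(x, str):
--             return any(recursively_in(item, n) for item in x)
--     return [k for k, v in d.items() if recursively_in(v, needle)]
-- ===== SOURCE B (Python) =====
-- from typing import Any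
-- from typing import Dict
-- from typing import Iterable
--
-- def keys_containing_value(d: Dict, needle: Any):
--     def matches(v: Any) -> bool:
--         work = [v]
--         while work:
--             x = work.pop(0)
--             if isinstance(x, str) and isinstance(needle, str):
--                 if needle in x:
--                     return True
--             elif type(x) is type(needle):
--                 if x == needle:
--                     return True
--             elif isinstance(x, Iterable):
--                 work.extend(x)
--         return False
--     result = []
--     for k, v in d.items():
--         if matches(v):
--             result.append(k)
--     return result
-- ===== Notes on version B (the rewrite author's own statement) =====
-- stated objective: alternative
-- what changed: A's recursive isinstance-dispatch helper over the value is replaced by an iterative worklist predicate that scans the strings with an early-exit loop, and the outer list comprehension by an explicit for-loop with a result accumulator.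
import Mathlib
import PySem

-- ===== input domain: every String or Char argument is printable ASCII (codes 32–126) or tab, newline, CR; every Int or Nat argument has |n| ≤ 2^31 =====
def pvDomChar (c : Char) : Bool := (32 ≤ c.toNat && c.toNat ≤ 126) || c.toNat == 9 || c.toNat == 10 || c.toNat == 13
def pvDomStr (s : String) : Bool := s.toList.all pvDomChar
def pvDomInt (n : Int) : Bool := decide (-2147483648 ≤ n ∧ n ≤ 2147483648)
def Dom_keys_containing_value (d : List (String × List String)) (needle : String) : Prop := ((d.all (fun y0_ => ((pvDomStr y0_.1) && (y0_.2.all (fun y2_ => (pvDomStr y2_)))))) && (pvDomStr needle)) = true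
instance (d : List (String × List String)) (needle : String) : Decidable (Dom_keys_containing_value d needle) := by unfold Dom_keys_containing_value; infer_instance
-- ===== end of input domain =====

-- B replaces A's recursive isinstance-dispatch helper with an iterative worklist predicate
-- and an explicit result-accumulator loop (alternative decomposition; same cost).

-- ===== PORT A =====
-- recursively_in(x, n) on the typed domain: x is a list of strings, n a string, so the
-- call reduces to any(needle in item for item in x), each item being the both-str branch.
def pvRecursivelyIn (x : List String) (n : String) : Bool :=
  x.any (fun item => PySem.Str.isIn n item)

def keys_containing_value (d : List (String × List String)) (needle : String) : List String :=
  (d.filter (fun kv => pvRecursivelyIn kv.2 needle)).map (fun kv => kv.1)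

-- ===== PORT B =====
-- matches(v): worklist seeded with v's items; pop front, return True on a substring hit.
def pvMatches : List String → String → Bool
  | [], _ => false
  | x :: work, needle => if PySem.Str.isIn needle x then true else pvMatches work needle

def keys_containing_value_alt (d : List (String × List String)) (needle : String) : List String :=
  d.foldl (fun result kv => if pvMatches kv.2 needle then result ++ [kv.1] else result) []

-- ===== PRECONDITION & SPEC =====
def Spec_keys_containing_value (d : List (String × List String)) (needle : String) (out : List String) : Prop := out = keys_containing_value_alt d needle
instance (d : List (String × List String)) (needle : String) (out : List String) : Decidable (Spec_keys_containing_value d needle out) := by unfold Spec_keys_containing_value; infer_instance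

-- ===== CLAIM (what is proved, stated in full; the proofs are below) =====
def Claim_equal_keys_containing_value : Prop := ∀ (d : List (String × List String)) (needle : String), Dom_keys_containing_value d needle → Spec_keys_containing_value d needle (keys_containing_value d needle)

-- ===== LEMMAS AND PROOFS =====
theorem pvMatches_eq_any (v : List String) (n : String) :
    pvMatches v n = v.any (fun item => PySem.Str.isIn n item) := by
  induction v with
  | nil => rfl
  | cons x t ih =>
      rw [pvMatches, List.any_cons, ← ih]
      cases PySem.Str.isIn n x <;> simp

-- ===== VERDICT (by name: the statement is the Claim_ definition above) =====
theorem keys_containing_value_spec : Claim_equal_keys_containing_value := by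
  intro d needle _
  unfold Spec_keys_containing_value keys_containing_value keys_containing_value_alt
  rw [PySem.List.foldl_append_if (fun kv : String × List String => pvMatches kv.2 needle) (fun kv => kv.1) d []]
  simp only [pvMatches_eq_any, pvRecursivelyIn, List.nil_append]
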